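-- pv_equiv track=rewrite | github.com/wahhajjaved/large_language_maniacs | downloaded_data/ctssb/training/python-icat_905dd8c1bb4ab2373649afa24992fbf8ea6f09ac_after.py | _parents
-- ===== SOURCE A (Python) =====
-- def _parents(obj):
--     """Iterate over the parents of obj as dot separated components.
--
--     >>> list(_parents("a.bb.c.ddd.e.ff"))
--     ['a', 'a.bb', 'a.bb.c', 'a.bb.c.ddd', 'a.bb.c.ddd.e']
--     >>> list(_parents("abc"))
--     []
--     """
--     s = 0
--     while True:
--         i = obj.find('.', s)
--         if i < 0:
--             break
--         yield obj[:i]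
--         s = i+1
-- ===== SOURCE B (Python) =====
-- def _parents(obj):
--     """Iterate over the parents of obj as dot separated components."""
--     parts = obj.split('.')
--     for i in range(1, len(parts)):
--         yield '.'.join(parts[:i])
-- ===== Notes on version B (the rewrite author's own statement) =====
-- stated objective: idiomatic
-- what changed: B splits the string into its dot-separated components once and yields each proper prefix of that component list re-joined with the dot separator, instead of A's while-loop that repeatedly scans with str.find and slices the string at each dot.
import Mathlib
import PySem

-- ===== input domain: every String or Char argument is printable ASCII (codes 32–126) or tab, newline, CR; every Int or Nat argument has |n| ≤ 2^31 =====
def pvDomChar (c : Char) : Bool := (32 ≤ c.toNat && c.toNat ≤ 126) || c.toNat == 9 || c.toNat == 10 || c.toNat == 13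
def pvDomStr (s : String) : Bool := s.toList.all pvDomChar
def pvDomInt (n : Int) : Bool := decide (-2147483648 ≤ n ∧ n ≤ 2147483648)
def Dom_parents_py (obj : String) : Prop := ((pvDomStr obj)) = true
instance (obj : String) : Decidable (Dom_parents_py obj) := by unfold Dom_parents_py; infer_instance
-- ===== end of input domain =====

-- B replaces A's find-and-slice while-loop by one split on the dot separator plus
-- re-joining each proper prefix of the component list; same values, no speed claim.

-- ===== PORT A =====
-- A's 'while True: i = obj.find('.', s); …' loop; fuel only makes the loop total
-- (s strictly increases and stays ≤ len(obj), so len(obj)+1 steps always suffice).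
def parentsGo (obj : String) (s : Nat) : Nat → List String
  | 0 => []
  | fuel + 1 =>
    let i := PySem.Str.findFrom obj "." (s : Int)
    if i < 0 then []
    else PySem.Str.slice obj none (some i) :: parentsGo obj (i.toNat + 1) fuel

def parents_py (obj : String) : List String :=
  parentsGo obj 0 (obj.toList.length + 1)

-- ===== PORT B =====
def parents_py_alt (obj : String) : List String :=
  match PySem.Str.split? obj "." with
  | none => []   -- unreachable: the separator "." is nonempty
  | some parts =>
    (PySem.List.pyRange 1 (parts.length : Int) 1).map
      (fun i => PySem.Str.join "." (PySem.List.slice parts none (some i)))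

-- ===== PRECONDITION & SPEC =====
def Spec_parents_py (obj : String) (out : List String) : Prop := out = parents_py_alt obj
instance (obj : String) (out : List String) : Decidable (Spec_parents_py obj out) := by unfold Spec_parents_py; infer_instance

-- ===== CLAIM (what is proved, stated in full; the proofs are below) =====
def Claim_equal_parents_py : Prop := ∀ (obj : String), Dom_parents_py obj → Spec_parents_py obj (parents_py obj)

-- ===== LEMMAS AND PROOFS =====

-- reference function: yield pre ++ (consumed part of rest) at each '.' of rest
def ps (pre : List Char) : List Char → List (List Char)
  | [] => []
  | c :: t => if c = '.' then pre :: ps (pre ++ [c]) t else ps (pre ++ [c]) t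

-- reference split on '.'
def mySplit : List Char → List (List Char)
  | [] => [[]]
  | c :: t =>
    if c = '.' then [] :: mySplit t
    else match mySplit t with
      | [] => [[c]]
      | h :: r => (c :: h) :: r

lemma mySplit_ne_nil (l : List Char) : mySplit l ≠ [] := by
  cases l with
  | nil => simp [mySplit]
  | cons c t =>
    simp only [mySplit]
    split_ifs
    · simp
    · cases h : mySplit t <;> simp

lemma ps_no_dot (rest : List Char) (pre : List Char) (h : '.' ∉ rest) :
    ps pre rest = [] := by
  induction rest generalizing pre with
  | nil => rfl
  | cons c t ih =>
    simp only [List.mem_cons, not_or] at h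
    simp [ps, Ne.symm h.1, ih _ h.2]

lemma singleton_prefix_iff (a : Char) (l : List Char) :
    [a] <+: l ↔ l[0]? = some a := by
  cases l with
  | nil => simp
  | cons c t =>
    constructor
    · rintro ⟨s, hs⟩
      simp only [List.singleton_append, List.cons.injEq] at hs
      simp [hs.1]
    · intro h
      simp only [List.getElem?_cons_zero, Option.some.injEq] at h
      exact ⟨t, by simp [h]⟩

lemma ps_first_dot (f : Nat) (rest pre : List Char)
    (hno : ∀ j < f, rest[j]? ≠ some '.') (hdot : rest[f]? = some '.') :
    ps pre rest = (pre ++ rest.take f) :: ps (pre ++ rest.take (f + 1)) (rest.drop (f + 1)) := by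
  induction f generalizing rest pre with
  | zero =>
    cases rest with
    | nil => simp at hdot
    | cons c t =>
      simp only [List.getElem?_cons_zero, Option.some.injEq] at hdot
      subst hdot
      simp [ps]
  | succ f ih =>
    cases rest with
    | nil => simp at hdot
    | cons c t =>
      have hc : c ≠ '.' := by
        intro h; exact hno 0 (by omega) (by simp [h])
      have hno' : ∀ j < f, t[j]? ≠ some '.' := by
        intro j hj
        have := hno (j + 1) (by omega)
        simpa using this
      have hdot' : t[f]? = some '.' := by simpa using hdot
      simp only [ps, if_neg hc]
      rw [ih t (pre ++ [c]) hno' hdot']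
      simp

lemma A_go_eq (obj : String) (fuel s : Nat)
    (hs : s ≤ obj.toList.length) (hf : obj.toList.length + 1 - s ≤ fuel) :
    parentsGo obj s fuel = (ps (obj.toList.take s) (obj.toList.drop s)).map String.ofList := by
  induction fuel generalizing s with
  | zero => omega
  | succ fuel ih =>
    have hsep : (".").toList = ['.'] := rfl
    set cs := obj.toList with hcs
    have hfind : PySem.Str.findFrom obj "." (s : Int) =
        (if PySem.Chars.find (cs.drop s) ['.'] = -1 then -1
         else (s : Int) + PySem.Chars.find (cs.drop s) ['.']) := by
      show PySem.Chars.findFrom obj.toList (".").toList (s : Int) none = _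
      rw [hsep]
      exact PySem.Chars.findFrom_natCast cs ['.'] s hs
    by_cases hneg : PySem.Chars.find (cs.drop s) ['.'] = -1
    · -- no further dot
      have hnod : '.' ∉ cs.drop s := by
        intro hmem
        obtain ⟨l1, l2, hl⟩ := List.append_of_mem hmem
        exact (PySem.Chars.find_eq_neg_one_iff _ _ |>.mp hneg)
          ⟨l1, l2, by simp [hl]⟩
      rw [ps_no_dot _ _ hnod]
      simp only [parentsGo, hfind, if_pos hneg]
      norm_num
    · -- a dot at index s + k
      have hge : 0 ≤ PySem.Chars.find (cs.drop s) ['.'] := by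
        have h1 := PySem.Chars.neg_one_le_find (cs.drop s) ['.']
        have h2 : PySem.Chars.find (cs.drop s) ['.'] ≠ -1 := hneg
        omega
      set k := (PySem.Chars.find (cs.drop s) ['.']).toNat with hk
      have hkf : PySem.Chars.find (cs.drop s) ['.'] = (k : Int) := by omega
      obtain ⟨hpref, hmin⟩ := PySem.Chars.find_spec hge
      have hdot : (cs.drop s)[k]? = some '.' := by
        have := (singleton_prefix_iff '.' ((cs.drop s).drop k)).mp hpref
        simpa [List.getElem?_drop] using this
      have hno : ∀ j < k, (cs.drop s)[j]? ≠ some '.' := by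
        intro j hj hc
        exact hmin j hj ((singleton_prefix_iff '.' ((cs.drop s).drop j)).mpr
          (by simpa [List.getElem?_drop] using hc))
      have hklt : k < cs.length - s := by
        obtain ⟨hlt, -⟩ := List.getElem?_eq_some_iff.mp hdot
        have hlen : (cs.drop s).length = cs.length - s := by simp
        omega
      have hival : PySem.Str.findFrom obj "." (s : Int) = ((s + k : Nat) : Int) := by
        rw [hfind, if_neg hneg, hkf]; push_cast; ring
      simp only [parentsGo]
      rw [hival]
      rw [if_neg (by omega)]
      have htoNat : (((s + k : Nat) : Int)).toNat = s + k := by omega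
      rw [htoNat]
      have hslice : PySem.Str.slice obj none (some ((s + k : Nat) : Int)) =
          String.ofList (cs.take (s + k)) := by
        show String.ofList (PySem.Chars.slice obj.toList none (some ((s + k : Nat) : Int))) = _
        rw [PySem.Chars.slice_eq_listSlice, PySem.List.slice_to_natCast]
      rw [hslice, ih (s + k + 1) (by omega) (by omega)]
      rw [ps_first_dot k (cs.drop s) (cs.take s) hno hdot]
      simp only [List.map_cons]
      have h1 : cs.take s ++ (cs.drop s).take k = cs.take (s + k) := by
        rw [← List.take_add]
      have h2 : cs.take s ++ (cs.drop s).take (k + 1) = cs.take (s + k + 1) := by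
        rw [← List.take_add, Nat.add_assoc]
      have h3 : (cs.drop s).drop (k + 1) = cs.drop (s + k + 1) := by
        rw [List.drop_drop]; ring_nf
      rw [h1, h2, h3]

-- splitOn.go characterised by mySplit
def mapHead (f : List Char → List Char) : List (List Char) → List (List Char)
  | [] => []
  | h :: r => f h :: r

lemma splitOn_go_eq (fuel : Nat) (l cur : List Char) (acc : List (List Char))
    (hf : l.length ≤ fuel) :
    PySem.Chars.splitOn.go ['.'] fuel l cur acc =
      acc.reverse ++ mapHead (cur.reverse ++ ·) (mySplit l) := by
  induction fuel generalizing l cur acc with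
  | zero =>
    have : l = [] := List.length_eq_zero_iff.mp (by omega)
    subst this
    simp [PySem.Chars.splitOn.go, mySplit, mapHead]
  | succ fuel ih =>
    cases l with
    | nil => simp [PySem.Chars.splitOn.go, mySplit, mapHead]
    | cons c t =>
      by_cases hc : c = '.'
      · subst hc
        have hp : List.isPrefixOf ['.'] ('.' :: t) = true := by
          simp [List.isPrefixOf]
        simp only [PySem.Chars.splitOn.go, hp, if_true, List.drop_succ_cons,
          List.length_singleton, List.drop_zero]
        rw [ih t [] _ (by simp at hf; omega)]
        simp only [mySplit, reduceIte]
        cases h : mySplit t with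
        | nil => exact absurd h (mySplit_ne_nil t)
        | cons mh mr => simp [mapHead]
      · have hp : List.isPrefixOf ['.'] (c :: t) = false := by
          simp [List.isPrefixOf]
          intro h
          exact absurd h.symm hc
        simp only [PySem.Chars.splitOn.go, hp, Bool.false_eq_true, if_false]
        rw [ih t (c :: cur) _ (by simp at hf; omega)]
        simp only [mySplit, if_neg hc]
        cases h : mySplit t with
        | nil => exact absurd h (mySplit_ne_nil t)
        | cons mh mr => simp [mapHead]

lemma splitOn_eq_mySplit (cs : List Char) :
    PySem.Chars.splitOn cs ['.'] = mySplit cs := by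
  show PySem.Chars.splitOn.go ['.'] (cs.length + 1) cs [] [] = _
  rw [splitOn_go_eq _ _ _ _ (by omega)]
  cases h : mySplit cs with
  | nil => exact absurd h (mySplit_ne_nil cs)
  | cons mh mr => simp [mapHead]

lemma ic_cons_cons (s : List Char) (a b : List Char) (l : List (List Char)) :
    List.intercalate s (a :: b :: l) = a ++ s ++ List.intercalate s (b :: l) := by
  simp [List.intercalate]

lemma ic_cons_head (s : List Char) (c : Char) (h : List Char) (l : List (List Char)) :
    List.intercalate s ((c :: h) :: l) = c :: List.intercalate s (h :: l) := by
  cases l with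
  | nil => simp [List.intercalate]
  | cons b r => rw [ic_cons_cons, ic_cons_cons]; simp

lemma B_main (rest pre : List Char) :
    (List.range' 1 ((mySplit rest).length - 1)).map
      (fun i => pre ++ List.intercalate ['.'] ((mySplit rest).take i)) = ps pre rest := by
  induction rest generalizing pre with
  | nil => simp [mySplit, ps]
  | cons c t ih =>
    obtain ⟨mh, mr, hms⟩ : ∃ mh mr, mySplit t = mh :: mr := by
      cases h : mySplit t with
      | nil => exact absurd h (mySplit_ne_nil t)
      | cons a b => exact ⟨a, b, rfl⟩
    by_cases hc : c = '.'
    · subst hc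
      have hm2 : mySplit ('.' :: t) = [] :: mh :: mr := by
        rw [show mySplit ('.' :: t) = [] :: mySplit t from by simp [mySplit], hms]
      have hK : (mySplit ('.' :: t)).length - 1 = ((mySplit t).length - 1) + 1 := by
        simp [hm2, hms]
      have hps : ps pre ('.' :: t) = pre :: ps (pre ++ ['.']) t := by simp [ps]
      rw [hps, hK, List.range'_succ, List.map_cons]
      have hhead : pre ++ List.intercalate ['.'] ((mySplit ('.' :: t)).take 1) = pre := by
        simp [mySplit, hms, List.intercalate]
      rw [hhead]
      congr 1
      rw [← ih (pre ++ ['.'])]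
      rw [List.range'_eq_map_range, List.range'_eq_map_range, List.map_map, List.map_map]
      apply List.map_congr_left
      intro j _
      simp only [Function.comp_apply]
      have ht1 : (mySplit ('.' :: t)).take (2 + j) = [] :: (mh :: mr.take j) := by
        rw [hm2, show 2 + j = (j + 1) + 1 from by omega, List.take_succ_cons,
          List.take_succ_cons]
      have ht2 : (mySplit t).take (1 + j) = mh :: mr.take j := by
        rw [hms, Nat.add_comm, List.take_succ_cons]
      rw [ht1, ht2, ic_cons_cons]
      simp
    · have hms' : mySplit (c :: t) = (c :: mh) :: mr := by
        simp [mySplit, if_neg hc, hms]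
      have hK : (mySplit (c :: t)).length = (mySplit t).length := by
        simp [hms', hms]
      have hps : ps pre (c :: t) = ps (pre ++ [c]) t := by simp [ps, hc]
      rw [hps, ← ih (pre ++ [c]), hK]
      rw [List.range'_eq_map_range, List.map_map, List.map_map]
      apply List.map_congr_left
      intro j _
      simp only [Function.comp_apply]
      have ht1 : (mySplit (c :: t)).take (1 + j) = (c :: mh) :: mr.take j := by
        rw [hms', Nat.add_comm, List.take_succ_cons]
      have ht2 : (mySplit t).take (1 + j) = mh :: mr.take j := by
        rw [hms, Nat.add_comm, List.take_succ_cons]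
      rw [ht1, ht2, ic_cons_head]
      simp

lemma alt_eq (obj : String) :
    parents_py_alt obj = (ps [] obj.toList).map String.ofList := by
  have hsep : (".").toList = ['.'] := rfl
  have hsm := PySem.Str.split?_map obj "."
  rw [hsep] at hsm
  have hch : PySem.Chars.split? obj.toList ['.'] = some (mySplit obj.toList) := by
    simp [PySem.Chars.split?, splitOn_eq_mySplit]
  rw [hch] at hsm
  cases hsp : PySem.Str.split? obj "." with
  | none => rw [hsp] at hsm; simp at hsm
  | some parts =>
    rw [hsp] at hsm
    simp only [Option.map_some, Option.some.injEq] at hsm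
    have hlen : parts.length = (mySplit obj.toList).length := by
      rw [← hsm, List.length_map]
    simp only [parents_py_alt, hsp]
    rw [← B_main obj.toList []]
    rw [PySem.List.pyRange_one, List.range'_eq_map_range]
    simp only [List.map_map]
    have hcnt : ((parts.length : Int) - 1).toNat = (mySplit obj.toList).length - 1 := by
      omega
    rw [hcnt]
    apply List.map_congr_left
    intro j _
    simp only [Function.comp_apply]
    have hcast : (1 : Int) + (j : Int) = ((1 + j : Nat) : Int) := by push_cast; ring
    rw [hcast, PySem.List.slice_to_natCast]
    show String.ofList (PySem.Chars.join (".").toList ((parts.take (1 + j)).map String.toList)) = _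
    rw [hsep]
    simp only [PySem.Chars.join, List.nil_append]
    rw [List.map_take, hsm]

-- ===== VERDICT (by name: the statement is the Claim_ definition above) =====
theorem parents_py_spec : Claim_equal_parents_py := by
  intro obj _
  unfold Spec_parents_py
  rw [alt_eq]
  show parentsGo obj 0 (obj.toList.length + 1) = _
  rw [A_go_eq obj (obj.toList.length + 1) 0 (by omega) (by omega)]
  simp
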